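-- pv_equiv track=rewrite | github.com/f-lab-edu/multimodal-fashion-recommender-system | preprocess_data/download_images.py | pick_best_image_url
-- ===== SOURCE A (Python) =====
-- from typing import Optional, Tuple
--
-- def _score_image(img: dict) -> Tuple[int, Optional[str]]:
--     """
--     한 이미지에 대해 우선순위와 선택할 URL을 계산한다.
--     점수가 높을수록 더 좋은 품질/우선순위.
--     """
--     is_main = img.get("variant") == "MAIN"
--
--     # 1순위: MAIN + hi_res
--     if is_main and img.get("hi_res"):
--         return 4, img["hi_res"]
--
--     # 2순위: MAIN + large
--     if is_main and img.get("large"):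
--         return 3, img["large"]
--
--     # 3순위: 아무거나 hi_res
--     if img.get("hi_res"):
--         return 2, img["hi_res"]
--
--     # 4순위: 아무거나 large
--     if img.get("large"):
--         return 1, img["large"]
--
--     # 후보 없음
--     return 0, None
--
-- def pick_best_image_url(item: dict) -> Optional[str]:
--     images = item.get("images") or []
--     if not images:
--         return None
--
--     best_score = 0
--     best_url: Optional[str] = None
--
--     for img in images:
--         score, url = _score_image(img)
--         # 동일 점수면 먼저 나온 이미지를 유지하기 위해 '>'만 사용
--         if url is not None and score > best_score:
--             best_score = score
--             best_url = url
--
--     return best_url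
-- ===== SOURCE B (Python) =====
-- def pick_best_image_url(item):
--     images = item.get("images") or []
--     for img in images:
--         if img.get("variant") == "MAIN" and img.get("hi_res"):
--             return img["hi_res"]
--     for img in images:
--         if img.get("variant") == "MAIN" and img.get("large"):
--             return img["large"]
--     for img in images:
--         if img.get("hi_res"):
--             return img["hi_res"]
--     for img in images:
--         if img.get("large"):
--             return img["large"]
--     return None
-- ===== Notes on version B (the rewrite author's own statement) =====
-- stated objective: simpler
-- what changed: Replaced the scoring helper plus max-tracking accumulator scan with four priority-tiered short-circuiting passes (first MAIN+hi_res, then MAIN+large, then any hi_res, then any large), eliminating _score_image and the best_score/best_url state.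
import Mathlib
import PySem

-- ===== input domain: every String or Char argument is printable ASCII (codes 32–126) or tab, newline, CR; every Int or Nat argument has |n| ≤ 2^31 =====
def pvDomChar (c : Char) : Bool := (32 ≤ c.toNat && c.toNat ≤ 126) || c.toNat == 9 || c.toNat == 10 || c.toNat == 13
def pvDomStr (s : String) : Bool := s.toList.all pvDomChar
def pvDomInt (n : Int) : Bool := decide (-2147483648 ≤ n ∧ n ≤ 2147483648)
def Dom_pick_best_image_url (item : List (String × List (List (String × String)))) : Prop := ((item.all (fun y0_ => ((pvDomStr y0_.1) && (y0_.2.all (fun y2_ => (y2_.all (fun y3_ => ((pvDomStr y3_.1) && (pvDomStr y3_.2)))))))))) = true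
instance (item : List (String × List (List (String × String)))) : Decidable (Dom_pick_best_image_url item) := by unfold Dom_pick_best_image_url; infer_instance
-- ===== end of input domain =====

-- B replaces A's scoring helper + max-tracking accumulator scan with four
-- priority-tiered short-circuiting passes; objective: simpler.

-- ===== PORT A =====
-- shared primitives: dict.get(k), Python truthiness of an optional string,
-- and the guarded lookups img["hi_res"] / img["large"]
def pvGet (img : List (String × String)) (k : String) : Option String :=
  (PySem.Dict.mk img).get? k

def pvTruthy (o : Option String) : Bool :=
  match o with
  | some s => !(s == "")
  | none => false

def pvHi (img : List (String × String)) : Option String := some ((pvGet img "hi_res").getD "")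
def pvLg (img : List (String × String)) : Option String := some ((pvGet img "large").getD "")

-- _score_image
def pvScoreImage (img : List (String × String)) : Int × Option String :=
  let isMain := pvGet img "variant" == some "MAIN"
  if isMain && pvTruthy (pvGet img "hi_res") then (4, pvHi img)
  else if isMain && pvTruthy (pvGet img "large") then (3, pvLg img)
  else if pvTruthy (pvGet img "hi_res") then (2, pvHi img)
  else if pvTruthy (pvGet img "large") then (1, pvLg img)
  else (0, none)

-- the body of A's for-loop: update (best_score, best_url)
def pvStep (st : Int × Option String) (img : List (String × String)) : Int × Option String :=
  let sc := pvScoreImage img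
  if sc.2.isSome && decide (sc.1 > st.1) then sc else st

def pick_best_image_url (item : List (String × List (List (String × String)))) : Option String :=
  let images := ((PySem.Dict.mk item).get? "images").getD []
  if images = [] then none
  else (images.foldl pvStep (0, none)).2

-- ===== PORT B =====
-- the four pass predicates of Source B
def pvP4 (img : List (String × String)) : Bool :=
  (pvGet img "variant" == some "MAIN") && pvTruthy (pvGet img "hi_res")
def pvP3 (img : List (String × String)) : Bool :=
  (pvGet img "variant" == some "MAIN") && pvTruthy (pvGet img "large")
def pvP2 (img : List (String × String)) : Bool := pvTruthy (pvGet img "hi_res")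
def pvP1 (img : List (String × String)) : Bool := pvTruthy (pvGet img "large")

def pick_best_image_url_alt (item : List (String × List (List (String × String)))) : Option String :=
  let images := ((PySem.Dict.mk item).get? "images").getD []
  match images.find? pvP4 with
  | some i => pvHi i
  | none =>
    match images.find? pvP3 with
    | some i => pvLg i
    | none =>
      match images.find? pvP2 with
      | some i => pvHi i
      | none =>
        match images.find? pvP1 with
        | some i => pvLg i
        | none => none

-- ===== PRECONDITION & SPEC =====
def Spec_pick_best_image_url (item : List (String × List (List (String × String)))) (out : Option String) : Prop := out = pick_best_image_url_alt item
instance (item : List (String × List (List (String × String)))) (out : Option String) : Decidable (Spec_pick_best_image_url item out) := by unfold Spec_pick_best_image_url; infer_instance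

-- ===== CLAIM (what is proved, stated in full; the proofs are below) =====
def Claim_equal_pick_best_image_url : Prop := ∀ (item : List (String × List (List (String × String)))), Dom_pick_best_image_url item → Spec_pick_best_image_url item (pick_best_image_url item)

-- ===== LEMMAS AND PROOFS =====

-- tiered search gated by a score threshold b: the value of A's loop started in state (b, u)
def pvGat (xs : List (List (String × String))) (b : Int) (u : Option String) : Option String :=
  match (if 4 > b then xs.find? pvP4 else none) with
  | some i => pvHi i
  | none =>
    match (if 3 > b then xs.find? pvP3 else none) with
    | some i => pvLg i
    | none =>
      match (if 2 > b then xs.find? pvP2 else none) with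
      | some i => pvHi i
      | none =>
        match (if 1 > b then xs.find? pvP1 else none) with
        | some i => pvLg i
        | none => u

theorem pvScoreImage_eq (img : List (String × String)) :
    pvScoreImage img =
      if pvP4 img then (4, pvHi img)
      else if pvP3 img then (3, pvLg img)
      else if pvP2 img then (2, pvHi img)
      else if pvP1 img then (1, pvLg img)
      else (0, none) := rfl

-- the five shapes of A's loop body
theorem pvStep_take4 {img : List (String × String)} {b : Int} {u : Option String}
    (h4 : pvP4 img = true) (hb : (4:Int) > b) : pvStep (b, u) img = (4, pvHi img) := by
  simp [pvStep, pvScoreImage_eq, h4, pvHi, hb]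

theorem pvStep_skip4 {img : List (String × String)} {b : Int} {u : Option String}
    (h4 : pvP4 img = true) (hb : ¬ ((4:Int) > b)) : pvStep (b, u) img = (b, u) := by
  simp [pvStep, pvScoreImage_eq, h4, hb]

theorem pvStep_take3 {img : List (String × String)} {b : Int} {u : Option String}
    (h4 : pvP4 img = false) (h3 : pvP3 img = true) (hb : (3:Int) > b) :
    pvStep (b, u) img = (3, pvLg img) := by
  simp [pvStep, pvScoreImage_eq, h4, h3, pvLg, hb]

theorem pvStep_skip3 {img : List (String × String)} {b : Int} {u : Option String}
    (h4 : pvP4 img = false) (h3 : pvP3 img = true) (hb : ¬ ((3:Int) > b)) :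
    pvStep (b, u) img = (b, u) := by
  simp [pvStep, pvScoreImage_eq, h4, h3, hb]

theorem pvStep_take2 {img : List (String × String)} {b : Int} {u : Option String}
    (h4 : pvP4 img = false) (h3 : pvP3 img = false) (h2 : pvP2 img = true) (hb : (2:Int) > b) :
    pvStep (b, u) img = (2, pvHi img) := by
  simp [pvStep, pvScoreImage_eq, h4, h3, h2, pvHi, hb]

theorem pvStep_skip2 {img : List (String × String)} {b : Int} {u : Option String}
    (h4 : pvP4 img = false) (h3 : pvP3 img = false) (h2 : pvP2 img = true) (hb : ¬ ((2:Int) > b)) :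
    pvStep (b, u) img = (b, u) := by
  simp [pvStep, pvScoreImage_eq, h4, h3, h2, hb]

theorem pvStep_take1 {img : List (String × String)} {b : Int} {u : Option String}
    (h4 : pvP4 img = false) (h3 : pvP3 img = false) (h2 : pvP2 img = false) (h1 : pvP1 img = true)
    (hb : (1:Int) > b) : pvStep (b, u) img = (1, pvLg img) := by
  simp [pvStep, pvScoreImage_eq, h4, h3, h2, h1, pvLg, hb]

theorem pvStep_skip1 {img : List (String × String)} {b : Int} {u : Option String}
    (h4 : pvP4 img = false) (h3 : pvP3 img = false) (h2 : pvP2 img = false) (h1 : pvP1 img = true)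
    (hb : ¬ ((1:Int) > b)) : pvStep (b, u) img = (b, u) := by
  simp [pvStep, pvScoreImage_eq, h4, h3, h2, h1, hb]

theorem pvStep_skip0 {img : List (String × String)} {b : Int} {u : Option String}
    (h4 : pvP4 img = false) (h3 : pvP3 img = false) (h2 : pvP2 img = false) (h1 : pvP1 img = false) :
    pvStep (b, u) img = (b, u) := by
  simp [pvStep, pvScoreImage_eq, h4, h3, h2, h1]

-- once the best score is ≥ 4 nothing can improve it
theorem pvGat_closed {xs : List (List (String × String))} {b : Int} {u : Option String}
    (hb : ¬ ((4:Int) > b)) : pvGat xs b u = u := by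
  have h3 : ¬ ((3:Int) > b) := by omega
  have h2 : ¬ ((2:Int) > b) := by omega
  have h1 : ¬ ((1:Int) > b) := by omega
  simp [pvGat, hb, h3, h2, h1]

-- how pvGat absorbs the head image, per case
theorem pvGat_take4 {x : List (String × String)} {xs : List (List (String × String))} {b : Int}
    {u : Option String} (h4 : pvP4 x = true) (hb : (4:Int) > b) :
    pvGat (x :: xs) b u = pvHi x := by
  simp [pvGat, h4, hb]

theorem pvGat_take3 {x : List (String × String)} {xs : List (List (String × String))} {b : Int}
    {u : Option String} (h4 : pvP4 x = false) (h3 : pvP3 x = true) (hb : (3:Int) > b) :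
    pvGat (x :: xs) b u = pvGat xs 3 (pvLg x) := by
  have hb4 : (4:Int) > b := by omega
  simp only [pvGat, List.find?_cons, h4, h3, if_pos hb4, if_pos hb,
    if_pos (show (4:Int) > 3 by norm_num), if_neg (show ¬ ((3:Int) > 3) by norm_num),
    if_neg (show ¬ ((2:Int) > 3) by norm_num), if_neg (show ¬ ((1:Int) > 3) by norm_num)]

theorem pvGat_take2 {x : List (String × String)} {xs : List (List (String × String))} {b : Int}
    {u : Option String} (h4 : pvP4 x = false) (h3 : pvP3 x = false) (h2 : pvP2 x = true)
    (hb : (2:Int) > b) : pvGat (x :: xs) b u = pvGat xs 2 (pvHi x) := by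
  have hb4 : (4:Int) > b := by omega
  have hb3 : (3:Int) > b := by omega
  simp only [pvGat, List.find?_cons, h4, h3, h2, if_pos hb4, if_pos hb3, if_pos hb,
    if_pos (show (4:Int) > 2 by norm_num), if_pos (show (3:Int) > 2 by norm_num),
    if_neg (show ¬ ((2:Int) > 2) by norm_num), if_neg (show ¬ ((1:Int) > 2) by norm_num)]

theorem pvGat_take1 {x : List (String × String)} {xs : List (List (String × String))} {b : Int}
    {u : Option String} (h4 : pvP4 x = false) (h3 : pvP3 x = false) (h2 : pvP2 x = false)
    (h1 : pvP1 x = true) (hb : (1:Int) > b) : pvGat (x :: xs) b u = pvGat xs 1 (pvLg x) := by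
  have hb4 : (4:Int) > b := by omega
  have hb3 : (3:Int) > b := by omega
  have hb2 : (2:Int) > b := by omega
  simp only [pvGat, List.find?_cons, h4, h3, h2, h1, if_pos hb4, if_pos hb3, if_pos hb2, if_pos hb,
    if_pos (show (4:Int) > 1 by norm_num), if_pos (show (3:Int) > 1 by norm_num),
    if_pos (show (2:Int) > 1 by norm_num), if_neg (show ¬ ((1:Int) > 1) by norm_num)]

theorem pvGat_skip4 {x : List (String × String)} {xs : List (List (String × String))} {b : Int}
    {u : Option String} (hb : ¬ ((4:Int) > b)) : pvGat (x :: xs) b u = pvGat xs b u :=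
  (pvGat_closed hb).trans (pvGat_closed hb).symm

theorem pvGat_skip3 {x : List (String × String)} {xs : List (List (String × String))} {b : Int}
    {u : Option String} (h4 : pvP4 x = false) (hb : ¬ ((3:Int) > b)) :
    pvGat (x :: xs) b u = pvGat xs b u := by
  have h2 : ¬ ((2:Int) > b) := by omega
  have h1 : ¬ ((1:Int) > b) := by omega
  simp only [pvGat, List.find?_cons, h4, if_neg hb, if_neg h2, if_neg h1]

theorem pvGat_skip2 {x : List (String × String)} {xs : List (List (String × String))} {b : Int}
    {u : Option String} (h4 : pvP4 x = false) (h3 : pvP3 x = false) (hb : ¬ ((2:Int) > b)) :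
    pvGat (x :: xs) b u = pvGat xs b u := by
  have h1 : ¬ ((1:Int) > b) := by omega
  simp only [pvGat, List.find?_cons, h4, h3, if_neg hb, if_neg h1]

theorem pvGat_skip1 {x : List (String × String)} {xs : List (List (String × String))} {b : Int}
    {u : Option String} (h4 : pvP4 x = false) (h3 : pvP3 x = false) (h2 : pvP2 x = false)
    (hb : ¬ ((1:Int) > b)) : pvGat (x :: xs) b u = pvGat xs b u := by
  simp only [pvGat, List.find?_cons, h4, h3, h2, if_neg hb]

theorem pvGat_skip0 {x : List (String × String)} {xs : List (List (String × String))} {b : Int}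
    {u : Option String} (h4 : pvP4 x = false) (h3 : pvP3 x = false) (h2 : pvP2 x = false)
    (h1 : pvP1 x = false) : pvGat (x :: xs) b u = pvGat xs b u := by
  simp only [pvGat, List.find?_cons, h4, h3, h2, h1]

-- A's loop from any state computes the gated tiered search
theorem pvLoop_eq_pvGat (xs : List (List (String × String))) :
    ∀ (b : Int) (u : Option String), (xs.foldl pvStep (b, u)).2 = pvGat xs b u := by
  induction xs with
  | nil => intro b u; simp [pvGat]
  | cons x xs ih =>
    intro b u
    rw [List.foldl_cons]
    by_cases h4 : pvP4 x
    · by_cases hb : (4:Int) > b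
      · rw [pvStep_take4 h4 hb, ih, pvGat_closed (show ¬ ((4:Int) > 4) by norm_num),
          pvGat_take4 h4 hb]
      · rw [pvStep_skip4 h4 hb, ih, pvGat_skip4 hb]
    · rw [Bool.not_eq_true] at h4
      by_cases h3 : pvP3 x
      · by_cases hb : (3:Int) > b
        · rw [pvStep_take3 h4 h3 hb, ih, pvGat_take3 h4 h3 hb]
        · rw [pvStep_skip3 h4 h3 hb, ih, pvGat_skip3 h4 hb]
      · rw [Bool.not_eq_true] at h3
        by_cases h2 : pvP2 x
        · by_cases hb : (2:Int) > b
          · rw [pvStep_take2 h4 h3 h2 hb, ih, pvGat_take2 h4 h3 h2 hb]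
          · rw [pvStep_skip2 h4 h3 h2 hb, ih, pvGat_skip2 h4 h3 hb]
        · rw [Bool.not_eq_true] at h2
          by_cases h1 : pvP1 x
          · by_cases hb : (1:Int) > b
            · rw [pvStep_take1 h4 h3 h2 h1 hb, ih, pvGat_take1 h4 h3 h2 h1 hb]
            · rw [pvStep_skip1 h4 h3 h2 h1 hb, ih, pvGat_skip1 h4 h3 h2 hb]
          · rw [Bool.not_eq_true] at h1
            rw [pvStep_skip0 h4 h3 h2 h1, ih, pvGat_skip0 h4 h3 h2 h1]

-- with threshold 0 every gate is open: pvGat is exactly B's tiered chain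
theorem pvGat_zero (xs : List (List (String × String))) (u : Option String) :
    pvGat xs 0 u =
      match xs.find? pvP4 with
      | some i => pvHi i
      | none =>
        match xs.find? pvP3 with
        | some i => pvLg i
        | none =>
          match xs.find? pvP2 with
          | some i => pvHi i
          | none =>
            match xs.find? pvP1 with
            | some i => pvLg i
            | none => u := by
  simp only [pvGat, if_pos (show (4:Int) > 0 by norm_num), if_pos (show (3:Int) > 0 by norm_num),
    if_pos (show (2:Int) > 0 by norm_num), if_pos (show (1:Int) > 0 by norm_num)]

-- ===== VERDICT (by name: the statement is the Claim_ definition above) =====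
theorem pick_best_image_url_spec : Claim_equal_pick_best_image_url := by
  intro item _
  show pick_best_image_url item = pick_best_image_url_alt item
  simp only [pick_best_image_url, pick_best_image_url_alt]
  generalize ((PySem.Dict.mk item).get? "images").getD [] = images
  by_cases h : images = []
  · subst h; rfl
  · rw [if_neg h, pvLoop_eq_pvGat, pvGat_zero]
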